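-- pv_equiv track=rewrite | github.com/tboggess378/CSC500-Principles-Of-Programming | CSC506_DesignAndAnalysisOfAlgorithms/Module 2/Estimate_String_Distance.py | travel_a_word
-- ===== SOURCE A (Python) =====
-- def travel_a_word(original_word, test_word):
--     # create list for previous letters and set the distance to zero
--     prev_letters = list()
--     current_distance = 0
--     original_word = original_word.lower()
--     test_word = test_word.lower()
--
--     # iterate through the letters in the test word and the original word
--     for original_letter, test_letter in zip(original_word, test_word):
--
--         # Store previous letters in the original word
--         prev_letters.append(original_letter)
--
--         # compare the current letter in the test word to see if it exists in the original word
--         if test_letter not in prev_letters: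
--             current_distance += 20
--         else:
--             current_distance += 5
--
--     return current_distance
-- ===== SOURCE B (Python) =====
-- def travel_a_word(original_word, test_word):
--     original = original_word.lower()
--     test = test_word.lower()
--     first = {}
--     for i, c in enumerate(original):
--         if c not in first:
--             first[c] = i
--     total = 0
--     for i, t in enumerate(test[:len(original)]):
--         total += 5 if (t in first and first[t] <= i) else 20
--     return total
-- ===== Notes on version B (the rewrite author's own statement) =====
-- stated objective: faster
-- what changed: Instead of growing a prefix list and scanning it for each paired letter, B precomputes a dict of each letter's first index in the lowercased original in one pass and then scores each position i by comparing first[t] <= i.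
import Mathlib
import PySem

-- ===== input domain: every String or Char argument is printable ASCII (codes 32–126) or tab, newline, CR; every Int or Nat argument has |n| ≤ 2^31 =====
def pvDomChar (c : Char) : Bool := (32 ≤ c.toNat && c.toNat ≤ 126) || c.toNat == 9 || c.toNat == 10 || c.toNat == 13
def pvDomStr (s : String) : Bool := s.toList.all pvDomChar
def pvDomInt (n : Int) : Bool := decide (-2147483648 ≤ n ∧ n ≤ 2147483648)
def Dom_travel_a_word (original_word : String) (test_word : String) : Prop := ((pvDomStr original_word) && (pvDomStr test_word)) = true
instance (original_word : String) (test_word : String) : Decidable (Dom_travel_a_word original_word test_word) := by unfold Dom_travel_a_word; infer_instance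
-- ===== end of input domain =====

-- B replaces A's growing prefix list with a dict of first-occurrence indices built in
-- one pass, then compares positions (first[t] <= i); alternative algorithm, O(n) vs O(n^2).

-- ===== PORT A =====
-- the 'for o, t in zip(...)' loop with its (prev_letters, current_distance) state
def travelLoopA : List (Char × Char) → List Char → Int → Int
  | [], _, acc => acc
  | (o, t) :: rest, prev, acc =>
    let prev' := prev ++ [o]
    if t ∉ prev' then travelLoopA rest prev' (acc + 20)
    else travelLoopA rest prev' (acc + 5)

def travel_a_word (original_word : String) (test_word : String) : Int :=
  travelLoopA (((PySem.Str.lower original_word).toList).zip ((PySem.Str.lower test_word).toList)) [] 0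

-- ===== PORT B =====
-- 'for i, c in enumerate(original): if c not in first: first[c] = i'
def travelBuildFirst : List (Int × Char) → PySem.Dict Char Int → PySem.Dict Char Int
  | [], d => d
  | (i, c) :: rest, d =>
    if d.contains c then travelBuildFirst rest d
    else travelBuildFirst rest (d.insert c i)

-- 'for i, t in enumerate(test[:len(original)]): total += 5 if (t in first and first[t] <= i) else 20'
def travelLoopB (first : PySem.Dict Char Int) : List (Int × Char) → Int → Int
  | [], total => total
  | (i, t) :: rest, total =>
    travelLoopB first rest
      (total + (match first.get? t with
                | some j => if j ≤ i then (5 : Int) else 20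
                | none => 20))

def travel_a_word_alt (original_word : String) (test_word : String) : Int :=
  let original := (PySem.Str.lower original_word).toList
  let test := (PySem.Str.lower test_word).toList
  let first := travelBuildFirst (PySem.List.enumerate original 0) PySem.Dict.empty
  travelLoopB first (PySem.List.enumerate (test.take original.length) 0) 0

-- ===== PRECONDITION & SPEC =====
def Spec_travel_a_word (original_word : String) (test_word : String) (out : Int) : Prop := out = travel_a_word_alt original_word test_word
instance (original_word : String) (test_word : String) (out : Int) : Decidable (Spec_travel_a_word original_word test_word out) := by unfold Spec_travel_a_word; infer_instance

-- ===== CLAIM (what is proved, stated in full; the proofs are below) =====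
def Claim_equal_travel_a_word : Prop := ∀ (original_word : String) (test_word : String), Dom_travel_a_word original_word test_word → Spec_travel_a_word original_word test_word (travel_a_word original_word test_word)

-- ===== LEMMAS AND PROOFS =====

-- first index of c in l, counting from s (proof-side specification of the 'first' dict)
def firstIdx? : List Char → Char → Int → Option Int
  | [], _, _ => none
  | a :: l, c, s => if a = c then some s else firstIdx? l c (s + 1)

lemma firstIdx?_ge : ∀ (l : List Char) (c : Char) (s j : Int),
    firstIdx? l c s = some j → s ≤ j := by
  intro l
  induction l with
  | nil => intro c s j h; simp [firstIdx?] at h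
  | cons a l ih =>
    intro c s j h
    simp only [firstIdx?] at h
    split at h
    · simp only [Option.some.injEq] at h; omega
    · have := ih c (s + 1) j h; omega

lemma mem_take_iff_firstIdx? : ∀ (l : List Char) (c : Char) (s : Int) (m : Nat),
    c ∈ l.take m ↔ ∃ j, firstIdx? l c s = some j ∧ j < s + m := by
  intro l
  induction l with
  | nil => intro c s m; simp [firstIdx?]
  | cons a l ih =>
    intro c s m
    cases m with
    | zero =>
      simp only [List.take_zero, List.not_mem_nil, false_iff]
      rintro ⟨j, hj, hlt⟩
      simp only [firstIdx?] at hj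
      split at hj
      · simp only [Option.some.injEq] at hj; omega
      · have := firstIdx?_ge l c (s + 1) j hj; omega
    | succ m =>
      simp only [List.take_succ_cons, List.mem_cons, firstIdx?]
      by_cases hac : a = c
      · subst hac
        simp
      · rw [if_neg hac]
        have := ih c (s + 1) m
        constructor
        · rintro (h | h)
          · exact absurd h.symm hac
          · obtain ⟨j, hj, hlt⟩ := this.mp h
            exact ⟨j, hj, by omega⟩
        · rintro ⟨j, hj, hlt⟩
          right
          exact this.mpr ⟨j, hj, by omega⟩

lemma buildFirst_get? : ∀ (l : List Char) (s : Int) (d : PySem.Dict Char Int) (c : Char),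
    (travelBuildFirst (PySem.List.enumerate l s) d).get? c
      = match d.get? c with
        | some v => some v
        | none => firstIdx? l c s := by
  intro l
  induction l with
  | nil =>
    intro s d c
    simp only [PySem.List.enumerate_nil, travelBuildFirst, firstIdx?]
    cases d.get? c <;> rfl
  | cons a l ih =>
    intro s d c
    rw [PySem.List.enumerate_cons]
    simp only [travelBuildFirst, firstIdx?]
    by_cases hcont : d.contains a = true
    · rw [if_pos hcont, ih]
      by_cases hca : a = c
      · subst hca
        have : (d.get? a).isSome := by
          rw [← PySem.Dict.contains_eq_isSome_get?]; exact hcont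
        obtain ⟨v, hv⟩ := Option.isSome_iff_exists.mp this
        simp [hv]
      · rw [if_neg hca]
    · rw [if_neg hcont, ih]
      have hdc : d.contains a = false := by simpa using hcont
      by_cases hca : a = c
      · subst hca
        have hnone : d.get? a = none := by
          have := PySem.Dict.contains_eq_isSome_get? (d := d) (k := a)
          rw [hdc] at this
          cases h : d.get? a
          · rfl
          · rw [h] at this; simp at this
        rw [PySem.Dict.get?_insert_self, hnone, if_pos rfl]
      · rw [PySem.Dict.get?_insert_of_ne d s (Ne.symm hca), if_neg hca]

lemma loops_eq (full : List Char) (first : PySem.Dict Char Int)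
    (hfirst : ∀ c, first.get? c = firstIdx? full c 0) :
    ∀ (os : List Char) (ts prev : List Char) (acc : Int), full = prev ++ os →
      travelLoopA (os.zip ts) prev acc
        = travelLoopB first (PySem.List.enumerate (ts.take os.length) (prev.length : Int)) acc := by
  intro os
  induction os with
  | nil =>
    intro ts prev acc _
    simp [travelLoopA, travelLoopB, PySem.List.enumerate_nil]
  | cons o os ih =>
    intro ts prev acc hfull
    cases ts with
    | nil =>
      simp [travelLoopA, travelLoopB, PySem.List.enumerate_nil]
    | cons t ts =>
      simp only [List.zip_cons_cons, List.length_cons, List.take_succ_cons]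
      rw [PySem.List.enumerate_cons]
      simp only [travelLoopA, travelLoopB]
      have htake : full.take (prev.length + 1) = prev ++ [o] := by
        subst hfull
        simp [List.take_append]
      have hmem : t ∈ prev ++ [o] ↔
          ∃ j, firstIdx? full t 0 = some j ∧ j < (0 : Int) + (prev.length + 1) := by
        rw [← htake]; exact mem_take_iff_firstIdx? full t 0 (prev.length + 1)
      have hfull' : full = (prev ++ [o]) ++ os := by simp [hfull]
      have ihx := ih ts (prev ++ [o])
      rw [hfirst t]
      cases hj : firstIdx? full t 0 with
      | none =>
        have hnot : t ∉ prev ++ [o] := by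
          intro h
          obtain ⟨j, hj', _⟩ := hmem.mp h
          rw [hj] at hj'; cases hj'
        rw [if_pos hnot]
        simpa using ihx (acc + 20) hfull'
      | some j =>
        by_cases hle : j ≤ (prev.length : Int)
        · have hin : t ∈ prev ++ [o] := hmem.mpr ⟨j, hj, by omega⟩
          rw [if_neg (not_not_intro hin)]
          simpa [hle] using ihx (acc + 5) hfull'
        · have hnot : t ∉ prev ++ [o] := by
            intro h
            obtain ⟨j', hj', hlt⟩ := hmem.mp h
            rw [hj] at hj'
            cases hj'
            omega
          rw [if_pos hnot]
          simpa [hle] using ihx (acc + 20) hfull'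

-- ===== VERDICT (by name: the statement is the Claim_ definition above) =====
theorem travel_a_word_spec : Claim_equal_travel_a_word := by
  intro original_word test_word _
  unfold Spec_travel_a_word travel_a_word travel_a_word_alt
  set ol := (PySem.Str.lower original_word).toList with hol
  set tl := (PySem.Str.lower test_word).toList with htl
  have hfirst : ∀ c, (travelBuildFirst (PySem.List.enumerate ol 0) PySem.Dict.empty).get? c
      = firstIdx? ol c 0 := by
    intro c
    rw [buildFirst_get? ol 0 PySem.Dict.empty c]
    simp [PySem.Dict.get?_empty]
  have := loops_eq ol _ hfirst ol tl [] 0 (by simp)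
  simpa using this
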